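-- pv_equiv track=rewrite | github.com/LucaMica02/AlgorithmsCourseSapienza | Graphs/Graphs_Exercises.py | containPrincipalNode
-- ===== SOURCE A (Python) =====
-- def pricipalNode(G, n):
--
--     def DFS(G, n, V):
--         V[n] = 1
--         for i in G[n]:
--             if V[i] == 0:
--                 DFS(G, i, V)
--
--     V = [0] * len(G)
--     DFS(G, n, V)
--     if sum(V) == len(V):
--         return True
--     return False
--
-- def containPrincipalNode(G):
--
--     def DFS(G, n, V):
--         V[n] = 1
--         for i in G[n]:
--             if V[i] == 0:
--                 DFS(G, i, V)
--
--     V = [0] * len(G)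
--     last = None
--     # If the tree produced by a DFS on a node don't cover all the node in the graph
--     # that node and all the nodes present in that tree aren't principal node
--     for i in range(len(G)):
--         if V[i] == 0:
--             last = i
--             DFS(G, i, V)
--     # The last node that i called in the DFS maybe can be a principal node
--     return pricipalNode(G, last)
-- ===== SOURCE B (Python) =====
-- def containPrincipalNode(G):
--     n = len(G)
--
--     def flood(start, V):
--         # iterative DFS with an explicit stack: mark every node reachable from start
--         stack = [start]
--         while stack:
--             u = stack.pop()
--             if V[u] == 0:
--                 V[u] = 1
--                 for w in G[u]:
--                     if V[w] == 0:
--                         stack.append(w)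
--
--     V = [0] * n
--     last = None
--     for i in range(n):
--         if V[i] == 0:
--             last = i
--             flood(i, V)
--     W = [0] * n
--     flood(last, W)
--     return sum(W) == len(W)
-- ===== Notes on version B (the rewrite author's own statement) =====
-- stated objective: alternative
-- what changed: A's recursive DFS helper is replaced by an iterative flood-fill that maintains an explicit stack (pop a node, mark it, push its still-unmarked neighbours), keeping the two-phase candidate-then-verify strategy; the verification phase reuses the same iterative flood instead of calling a second recursive helper.
-- outside the precondition, e.g. on containPrincipalNode([]): A raises TypeError, B raises TypeError
import Mathlib
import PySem

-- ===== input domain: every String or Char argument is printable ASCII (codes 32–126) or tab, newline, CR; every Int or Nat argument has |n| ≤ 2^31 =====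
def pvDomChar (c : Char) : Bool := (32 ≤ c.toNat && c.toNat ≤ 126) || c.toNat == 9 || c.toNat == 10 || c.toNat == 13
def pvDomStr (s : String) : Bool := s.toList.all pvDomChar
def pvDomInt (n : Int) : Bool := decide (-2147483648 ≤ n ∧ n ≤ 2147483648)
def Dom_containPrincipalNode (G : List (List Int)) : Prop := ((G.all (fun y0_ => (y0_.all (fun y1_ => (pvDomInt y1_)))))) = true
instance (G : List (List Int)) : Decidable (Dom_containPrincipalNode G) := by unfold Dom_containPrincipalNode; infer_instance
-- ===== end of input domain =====

-- B replaces A's recursive DFS helpers by an iterative explicit-stack flood-fill (same two-phase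
-- strategy, same asymptotic cost); proved to return the same Bool on every input A accepts.


-- ===== PORT A =====
-- recursive DFS of A; the Nat argument is fuel (a totality guard only: inside Pre_ the
-- recursion depth is bounded by the number of unvisited nodes, so G.length + 1 never runs out)
def dfsA (G : List (List Int)) : Nat → Int → List Int → List Int
  | 0, _, V => V
  | (fuel+1), n, V =>
    (PySem.List.pyGetD G n []).foldl
      (fun W i => if PySem.List.pyGetD W i 1 == 0 then dfsA G fuel i W else W)
      (PySem.List.pySetD V n 1)

def pricipalNode (G : List (List Int)) (n : Int) : Bool :=
  let V := dfsA G (G.length + 1) n (List.replicate G.length 0)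
  V.sum == (V.length : Int)

def containPrincipalNode (G : List (List Int)) : Bool :=
  let s := (PySem.List.pyRange 0 (G.length : Int) 1).foldl
    (fun (s : List Int × Option Int) i =>
      if PySem.List.pyGetD s.1 i 1 == 0 then (dfsA G (G.length + 1) i s.1, some i) else s)
    (List.replicate G.length 0, none)
  match s.2 with
  | some l => pricipalNode G l
  | none => false   -- unreachable inside Pre_: Python raises TypeError here (G = [])

-- ===== PORT B =====
-- iterative flood-fill of B; Nat argument is fuel (totality guard for the while loop)
def floodLoop (G : List (List Int)) : Nat → List Int → List Int → List Int
  | 0, _, V => V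
  | (fuel+1), stack, V =>
    match stack.getLast? with
    | none => V
    | some u =>
      let rest := stack.dropLast
      if PySem.List.pyGetD V u 1 == 0 then
        let V1 := PySem.List.pySetD V u 1
        floodLoop G fuel
          ((PySem.List.pyGetD G u []).foldl
            (fun st w => if PySem.List.pyGetD V1 w 1 == 0 then st ++ [w] else st) rest)
          V1
      else floodLoop G fuel rest V

def floodB (G : List (List Int)) (start : Int) (V : List Int) : List Int :=
  floodLoop G (1 + G.length * (1 + (G.map List.length).sum)) [start] V

def containPrincipalNode_alt (G : List (List Int)) : Bool :=
  let s := (PySem.List.pyRange 0 (G.length : Int) 1).foldl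
    (fun (s : List Int × Option Int) i =>
      if PySem.List.pyGetD s.1 i 1 == 0 then (floodB G i s.1, some i) else s)
    (List.replicate G.length 0, none)
  match s.2 with
  | some l =>
    let W := floodB G l (List.replicate G.length 0)
    W.sum == (W.length : Int)
  | none => false   -- unreachable inside Pre_: Python raises TypeError here (G = [])

-- ===== PRECONDITION & SPEC =====
-- Pre_: exactly where the Python A returns: G nonempty and every adjacency entry a valid
-- (possibly negative) Python index into G; outside this A raises (TypeError on G = [],
-- IndexError on an out-of-range entry).
def Pre_containPrincipalNode (G : List (List Int)) : Prop :=
  G ≠ [] ∧ ∀ row ∈ G, ∀ w ∈ row, PySem.Raise.InRange G.length w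
instance (G : List (List Int)) : Decidable (Pre_containPrincipalNode G) := by
  unfold Pre_containPrincipalNode; infer_instance

def pvWitness_containPrincipalNode : List (List Int) := [[1], [0]]

def Spec_containPrincipalNode (G : List (List Int)) (out : Bool) : Prop := out = containPrincipalNode_alt G
instance (G : List (List Int)) (out : Bool) : Decidable (Spec_containPrincipalNode G out) := by unfold Spec_containPrincipalNode; infer_instance

-- ===== CLAIM (what is proved, stated in full; the proofs are below) =====
def Claim_equal_containPrincipalNode : Prop := ∀ (G : List (List Int)), Dom_containPrincipalNode G → Pre_containPrincipalNode G → Spec_containPrincipalNode G (containPrincipalNode G)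

-- ===== LEMMAS AND PROOFS =====


-- micro lemmas
def nrm (N : Nat) (i : Int) : Nat := (PySem.List.pyIdx? N i).getD 0
def zerosV (V : List Int) : Nat := V.countP (fun v => v == 0)
def BinV (V : List Int) : Prop := ∀ j : Nat, V.getD j 1 = 0 ∨ V.getD j 1 = 1
def GOK (G : List (List Int)) : Prop := ∀ row ∈ G, ∀ w ∈ row, PySem.Raise.InRange G.length w
def adjN (G : List (List Int)) (u : Nat) : List Nat := (G.getD u []).map (nrm G.length)

inductive ReachU (G : List (List Int)) (V : List Int) (s : Nat) : Nat → Prop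
  | refl : ReachU G V s s
  | step (u w : Nat) : ReachU G V s u → w ∈ adjN G u → V.getD w 1 = 0 → ReachU G V s w

theorem nrm_lt {N : Nat} {i : Int} (h : PySem.Raise.InRange N i) : nrm N i < N := by
  obtain ⟨h1, h2⟩ := h
  by_cases h0 : 0 ≤ i <;> simp [nrm, PySem.List.pyIdx?, h0, h1, h2] <;> omega

theorem pyIdx_eq {N : Nat} {i : Int} (h : PySem.Raise.InRange N i) :
    PySem.List.pyIdx? N i = some (nrm N i) := by
  obtain ⟨h1, h2⟩ := h
  by_cases h0 : 0 ≤ i <;> simp [nrm, PySem.List.pyIdx?, h0, h1, h2]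

theorem pyGetD_nrm {α : Type} (xs : List α) {i : Int} (d : α)
    (h : PySem.Raise.InRange xs.length i) :
    PySem.List.pyGetD xs i d = xs.getD (nrm xs.length i) d := by
  have := pyIdx_eq h
  have hlt := nrm_lt h
  simp [PySem.List.pyGetD, PySem.List.pyGet?, this, List.getD, List.getElem?_eq_getElem hlt]

theorem pySetD_nrm {α : Type} (xs : List α) {i : Int} (v : α)
    (h : PySem.Raise.InRange xs.length i) :
    PySem.List.pySetD xs i v = xs.set (nrm xs.length i) v := by
  have := pyIdx_eq h
  simp [PySem.List.pySetD, PySem.List.pySet?, this]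
theorem getD_set_self (V : List Int) (k : Nat) (v : Int) (hk : k < V.length) :
    (V.set k v).getD k 1 = v := by
  simp [List.getD, List.getElem?_set_self', List.getElem?_eq_getElem hk]

theorem getD_set_ne (V : List Int) (k j : Nat) (v : Int) (h : j ≠ k) :
    (V.set k v).getD j 1 = V.getD j 1 := by
  simp [List.getD, List.getElem?_set_ne (by omega : k ≠ j)]

theorem getD_set_cases (V : List Int) (k j : Nat) :
    (V.set k 1).getD j 1 = V.getD j 1 ∨ (V.set k 1).getD j 1 = 1 := by
  by_cases h : j = k
  · subst h
    by_cases hk : j < V.length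
    · right; exact getD_set_self V j 1 hk
    · left; simp [List.set_eq_of_length_le (by omega : V.length ≤ j)]
  · left; exact getD_set_ne V k j 1 h

theorem lt_len_of_getD_zero {V : List Int} {j : Nat} (h : V.getD j 1 = 0) : j < V.length := by
  by_contra hj
  simp [List.getD, List.getElem?_eq_none (by omega : V.length ≤ j)] at h

theorem getD_replicate (N j : Nat) : (List.replicate N (0:Int)).getD j 1 = if j < N then 0 else 1 := by
  by_cases h : j < N
  · have hl : j < (List.replicate N (0:Int)).length := by simpa using h
    simp [List.getD, List.getElem?_eq_getElem hl, h]
  · have hl : (List.replicate N (0:Int)).length ≤ j := by simpa using h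
    simp [List.getD, List.getElem?_eq_none hl, h]

theorem zerosV_le_length (V : List Int) : zerosV V ≤ V.length := List.countP_le_length

theorem zerosV_pos {V : List Int} {k : Nat} (h : V.getD k 1 = 0) : 0 < zerosV V := by
  have hk := lt_len_of_getD_zero h
  have hmem : (0:Int) ∈ V := by
    have : V.getD k 1 = V[k] := List.getD_eq_getElem V 1 hk
    rw [this] at h
    exact h ▸ List.getElem_mem hk
  have : List.countP (fun v => v == (0:Int)) V ≠ 0 := by
    intro hc
    rw [List.countP_eq_zero] at hc
    exact absurd (by simp : ((0:Int) == 0) = true) (by simpa using hc 0 hmem)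
  unfold zerosV; omega

theorem zerosV_set_lt {V : List Int} {k : Nat} (h0 : V.getD k 1 = 0) :
    zerosV (V.set k 1) < zerosV V := by
  have hk := lt_len_of_getD_zero h0
  induction V generalizing k with
  | nil => simp at hk
  | cons a V ih =>
    cases k with
    | zero =>
      have : a = 0 := by simpa [List.getD] using h0
      subst this
      simp [zerosV, List.countP_cons]
    | succ k =>
      have h0' : V.getD k 1 = 0 := by simpa [List.getD] using h0
      have := ih h0' (by simpa using hk)
      simp only [List.set]
      simp [zerosV, List.countP_cons] at this ⊢
      omega

theorem zerosV_le_of_O {A B : List Int} (hlen : A.length = B.length)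
    (hO : ∀ j, A.getD j 1 = B.getD j 1 ∨ A.getD j 1 = 1) : zerosV A ≤ zerosV B := by
  induction B generalizing A with
  | nil => cases A <;> simp_all [zerosV]
  | cons b B ih =>
    cases A with
    | nil => simp [zerosV]
    | cons a A =>
      have h0 := hO 0
      simp only [List.getD] at h0
      simp at h0
      have hrec : zerosV A ≤ zerosV B := by
        refine ih (by simpa using hlen) (fun j => ?_)
        have := hO (j+1)
        simpa [List.getD] using this
      rcases h0 with h | h
      · subst h
        simp only [zerosV, List.countP_cons] at hrec ⊢
        omega
      · subst h
        simp only [zerosV, List.countP_cons] at hrec ⊢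
        by_cases hb : b = 0 <;> simp [hb] <;> omega

theorem ReachU_mono {G : List (List Int)} {A B : List Int} {t s j : Nat}
    (h0 : ∀ w, A.getD w 1 = 0 → B.getD w 1 = 0) (hb : ReachU G B t s) :
    ReachU G A s j → ReachU G B t j := by
  intro h
  induction h with
  | refl => exact hb
  | step u w _ hw hz ih => exact ReachU.step u w ih hw (h0 w hz)

theorem ReachU_inv {G : List (List Int)} {V : List Int} {s u : Nat}
    (h : ReachU G V s u) : u = s ∨ V.getD u 1 = 0 := by
  cases h with
  | refl => left; rfl
  | step u' w _ _ hz => right; exact hz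
theorem dfsA_len (G : List (List Int)) :
    ∀ fuel (n : Int) (V : List Int), (dfsA G fuel n V).length = V.length := by
  intro fuel
  induction fuel with
  | zero => intro n V; simp [dfsA]
  | succ fuel ih =>
    intro n V
    simp only [dfsA]
    have hbase : (PySem.List.pySetD V n 1).length = V.length := PySem.List.length_pySetD V n 1
    refine Eq.trans ?_ hbase
    generalize (PySem.List.pySetD V n 1) = W
    induction (PySem.List.pyGetD G n []) generalizing W with
    | nil => simp
    | cons i ns ihl =>
      simp only [List.foldl_cons]
      by_cases hg : PySem.List.pyGetD W i 1 == 0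
      · rw [if_pos hg, ihl (dfsA G fuel i W), ih i W]
      · rw [if_neg hg, ihl W]

theorem dfsA_O (G : List (List Int)) :
    ∀ fuel (n : Int) (V : List Int) (j : Nat),
      (dfsA G fuel n V).getD j 1 = V.getD j 1 ∨ (dfsA G fuel n V).getD j 1 = 1 := by
  intro fuel
  induction fuel with
  | zero => intro n V j; simp [dfsA]
  | succ fuel ih =>
    intro n V j
    simp only [dfsA]
    have hbase : ∀ j : Nat, (PySem.List.pySetD V n 1).getD j 1 = V.getD j 1 ∨
        (PySem.List.pySetD V n 1).getD j 1 = 1 := by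
      intro j
      simp only [PySem.List.pySetD, PySem.List.pySet?]
      cases h : PySem.List.pyIdx? V.length n with
      | none => simp
      | some k => simpa using getD_set_cases V k j
    suffices h : ∀ (ns : List Int) (W : List Int),
        (∀ j : Nat, W.getD j 1 = V.getD j 1 ∨ W.getD j 1 = 1) →
        ∀ j : Nat, ((ns.foldl (fun W i => if PySem.List.pyGetD W i 1 == 0 then dfsA G fuel i W else W) W).getD j 1 = V.getD j 1 ∨
          (ns.foldl (fun W i => if PySem.List.pyGetD W i 1 == 0 then dfsA G fuel i W else W) W).getD j 1 = 1) by
      exact h _ _ hbase j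
    intro ns
    induction ns with
    | nil => intro W hW j; simpa using hW j
    | cons i ns ihl =>
      intro W hW j
      simp only [List.foldl_cons]
      by_cases hg : PySem.List.pyGetD W i 1 == 0
      · rw [if_pos hg]
        refine ihl (dfsA G fuel i W) (fun j => ?_) j
        rcases ih i W j with h1 | h1
        · rw [h1]; exact hW j
        · right; exact h1
      · rw [if_neg hg]
        exact ihl W hW j

theorem dfsA_mono (G : List (List Int)) (fuel : Nat) (n : Int) (V : List Int) (j : Nat)
    (h : V.getD j 1 = 1) : (dfsA G fuel n V).getD j 1 = 1 := by
  rcases dfsA_O G fuel n V j with h1 | h1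
  · rw [h1, h]
  · exact h1

theorem dfsA_bin (G : List (List Int)) (fuel : Nat) (n : Int) (V : List Int)
    (h : BinV V) : BinV (dfsA G fuel n V) := by
  intro j
  rcases dfsA_O G fuel n V j with h1 | h1
  · rw [h1]; exact h j
  · right; exact h1
theorem row_eq {G : List (List Int)} {n : Int} (hn : PySem.Raise.InRange G.length n) :
    PySem.List.pyGetD G n [] = G.getD (nrm G.length n) [] := pyGetD_nrm G [] hn

theorem row_mem {G : List (List Int)} {n : Int} (hn : PySem.Raise.InRange G.length n) :
    PySem.List.pyGetD G n [] ∈ G := by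
  rw [row_eq hn]
  have hlt := nrm_lt hn
  rw [List.getD_eq_getElem G [] hlt]
  exact List.getElem_mem hlt

theorem row_InRange {G : List (List Int)} (hG : GOK G) {n : Int}
    (hn : PySem.Raise.InRange G.length n) :
    ∀ i ∈ PySem.List.pyGetD G n [], PySem.Raise.InRange G.length i :=
  fun i hi => hG _ (row_mem hn) i hi

theorem mem_adjN_of {G : List (List Int)} {n : Int} (hn : PySem.Raise.InRange G.length n)
    {i : Int} (hi : i ∈ PySem.List.pyGetD G n []) :
    nrm G.length i ∈ adjN G (nrm G.length n) := by
  unfold adjN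
  rw [← row_eq hn]
  exact List.mem_map_of_mem hi

theorem adjN_char {G : List (List Int)} {n : Int} (hn : PySem.Raise.InRange G.length n)
    {w : Nat} (hw : w ∈ adjN G (nrm G.length n)) :
    ∃ i ∈ PySem.List.pyGetD G n [], w = nrm G.length i := by
  unfold adjN at hw
  rw [← row_eq hn] at hw
  obtain ⟨i, hi, hiw⟩ := List.mem_map.mp hw
  exact ⟨i, hi, hiw.symm⟩

theorem dfsA_S (G : List (List Int)) (hG : GOK G) :
    ∀ fuel (n : Int) (V : List Int), PySem.Raise.InRange G.length n → V.length = G.length →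
      ∀ j : Nat, (dfsA G fuel n V).getD j 1 = 1 →
        V.getD j 1 = 1 ∨ ReachU G V (nrm G.length n) j := by
  intro fuel
  induction fuel with
  | zero => intro n V _ _ j h; left; simpa [dfsA] using h
  | succ fuel ih =>
    intro n V hn hVN j
    simp only [dfsA]
    have hsetE : PySem.List.pySetD V n 1 = V.set (nrm G.length n) 1 := by
      rw [pySetD_nrm V 1 (hVN ▸ hn), hVN]
    -- invariant for the fold
    suffices h : ∀ (ns : List Int) (W : List Int),
        (∀ i ∈ ns, PySem.Raise.InRange G.length i) →
        (∀ i ∈ ns, nrm G.length i ∈ adjN G (nrm G.length n)) →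
        W.length = G.length →
        (∀ j : Nat, W.getD j 1 = 0 → V.getD j 1 = 0) →
        (∀ j : Nat, W.getD j 1 = 1 → V.getD j 1 = 1 ∨ ReachU G V (nrm G.length n) j) →
        ∀ j : Nat, ((ns.foldl (fun W i => if PySem.List.pyGetD W i 1 == 0 then dfsA G fuel i W else W) W).getD j 1 = 1 →
          V.getD j 1 = 1 ∨ ReachU G V (nrm G.length n) j) by
      refine h _ _ (row_InRange hG hn) (fun i hi => mem_adjN_of hn hi) ?_ ?_ ?_ j
      · rw [hsetE]; simpa using hVN
      · intro j hj
        rw [hsetE] at hj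
        by_cases hjn : j = nrm G.length n
        · rw [hjn] at hj
          have hlt : nrm G.length n < V.length := by rw [hVN]; exact nrm_lt hn
          rw [getD_set_self V _ 1 hlt] at hj; omega
        · rwa [getD_set_ne V _ j 1 hjn] at hj
      · intro j hj
        rw [hsetE] at hj
        by_cases hjn : j = nrm G.length n
        · right; rw [hjn]; exact ReachU.refl
        · rw [getD_set_ne V _ j 1 hjn] at hj; left; exact hj
    intro ns
    induction ns with
    | nil => intro W _ _ _ _ hS j hj; exact hS j (by simpa using hj)
    | cons i ns ihl =>
      intro W hns hadj hWN hZ hS j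
      simp only [List.foldl_cons]
      by_cases hg : PySem.List.pyGetD W i 1 == 0
      · rw [if_pos hg]
        have hiR : PySem.Raise.InRange G.length i := hns i (List.mem_cons_self)
        have hW0 : W.getD (nrm G.length i) 1 = 0 := by
          have := pyGetD_nrm W 1 (hWN ▸ hiR)
          rw [this, hWN] at hg
          simpa using hg
        have hVi0 : V.getD (nrm G.length i) 1 = 0 := hZ _ hW0
        have hbase : ReachU G V (nrm G.length n) (nrm G.length i) :=
          ReachU.step _ _ ReachU.refl (hadj i List.mem_cons_self) hVi0
        refine ihl (dfsA G fuel i W) (fun x hx => hns x (List.mem_cons_of_mem i hx))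
          (fun x hx => hadj x (List.mem_cons_of_mem i hx)) ?_ ?_ ?_ j
        · rw [dfsA_len, hWN]
        · intro x hx
          rcases dfsA_O G fuel i W x with h1 | h1
          · exact hZ x (h1 ▸ hx)
          · rw [h1] at hx; omega
        · intro x hx
          rcases ih i W hiR hWN x hx with h1 | h1
          · exact hS x h1
          · right
            exact ReachU_mono hZ hbase h1
      · rw [if_neg hg]
        exact ihl W (fun x hx => hns x (List.mem_cons_of_mem i hx))
          (fun x hx => hadj x (List.mem_cons_of_mem i hx)) hWN hZ hS j
theorem dfsA_C (G : List (List Int)) (hG : GOK G) :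
    ∀ fuel (n : Int) (V : List Int), PySem.Raise.InRange G.length n → V.length = G.length →
      BinV V → V.getD (nrm G.length n) 1 = 0 → zerosV V ≤ fuel →
      (dfsA G fuel n V).getD (nrm G.length n) 1 = 1 ∧
      (∀ u w : Nat, (dfsA G fuel n V).getD u 1 = 1 → (u = nrm G.length n ∨ V.getD u 1 = 0) →
        w ∈ adjN G u → (dfsA G fuel n V).getD w 1 = 1) := by
  intro fuel
  induction fuel with
  | zero =>
    intro n V _ _ _ h0 hfuel
    exact absurd (zerosV_pos h0) (by omega)
  | succ fuel ih =>
    intro n V hn hVN hBin h0 hfuel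
    have hsetE : PySem.List.pySetD V n 1 = V.set (nrm G.length n) 1 := by
      rw [pySetD_nrm V 1 (hVN ▸ hn), hVN]
    have hlt : nrm G.length n < V.length := by rw [hVN]; exact nrm_lt hn
    have hz1 : zerosV (V.set (nrm G.length n) 1) ≤ fuel := by
      have := zerosV_set_lt h0; omega
    have hV1len : (V.set (nrm G.length n) 1).length = G.length := by simpa using hVN
    have hV1bin : BinV (V.set (nrm G.length n) 1) := by
      intro j
      rcases getD_set_cases V (nrm G.length n) j with h | h
      · rw [h]; exact hBin j
      · right; exact h
    have key : ∀ (ns : List Int) (acc : List Int),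
        (∀ x ∈ ns, PySem.Raise.InRange G.length x) →
        acc.length = G.length → BinV acc →
        (∀ j : Nat, acc.getD j 1 = (V.set (nrm G.length n) 1).getD j 1 ∨ acc.getD j 1 = 1) →
        acc.getD (nrm G.length n) 1 = 1 →
        (∀ u w : Nat, acc.getD u 1 = 1 → V.getD u 1 = 0 → u ≠ nrm G.length n →
          w ∈ adjN G u → acc.getD w 1 = 1) →
        ((ns.foldl (fun W i => if PySem.List.pyGetD W i 1 == 0 then dfsA G fuel i W else W) acc).length = G.length ∧
         BinV (ns.foldl (fun W i => if PySem.List.pyGetD W i 1 == 0 then dfsA G fuel i W else W) acc) ∧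
         (∀ j : Nat, (ns.foldl (fun W i => if PySem.List.pyGetD W i 1 == 0 then dfsA G fuel i W else W) acc).getD j 1 = acc.getD j 1 ∨
            (ns.foldl (fun W i => if PySem.List.pyGetD W i 1 == 0 then dfsA G fuel i W else W) acc).getD j 1 = 1) ∧
         (ns.foldl (fun W i => if PySem.List.pyGetD W i 1 == 0 then dfsA G fuel i W else W) acc).getD (nrm G.length n) 1 = 1 ∧
         (∀ u w : Nat, (ns.foldl (fun W i => if PySem.List.pyGetD W i 1 == 0 then dfsA G fuel i W else W) acc).getD u 1 = 1 →
            V.getD u 1 = 0 → u ≠ nrm G.length n → w ∈ adjN G u →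
            (ns.foldl (fun W i => if PySem.List.pyGetD W i 1 == 0 then dfsA G fuel i W else W) acc).getD w 1 = 1) ∧
         (∀ x ∈ ns, (ns.foldl (fun W i => if PySem.List.pyGetD W i 1 == 0 then dfsA G fuel i W else W) acc).getD (nrm G.length x) 1 = 1)) := by
      intro ns
      induction ns with
      | nil =>
        intro acc _ hlen hbin hO hstart hclos
        exact ⟨hlen, hbin, fun j => Or.inl rfl, hstart, fun u w h1 h2 h3 h4 => hclos u w h1 h2 h3 h4, by simp⟩
      | cons i ns ihl =>
        intro acc hns hlen hbin hO hstart hclos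
        have hiR : PySem.Raise.InRange G.length i := hns i List.mem_cons_self
        have hgetE : PySem.List.pyGetD acc i 1 = acc.getD (nrm G.length i) 1 := by
          rw [pyGetD_nrm acc 1 (hlen ▸ hiR), hlen]
        simp only [List.foldl_cons]
        by_cases hg : PySem.List.pyGetD acc i 1 == 0
        · rw [if_pos hg]
          have hi0 : acc.getD (nrm G.length i) 1 = 0 := by rw [← hgetE]; simpa using hg
          have hzacc : zerosV acc ≤ fuel := by
            have := zerosV_le_of_O (by rw [hlen, hV1len]) hO
            omega
          obtain ⟨Astart, Aclos⟩ := ih i acc hiR hlen hbin hi0 hzacc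
          have hlen' : (dfsA G fuel i acc).length = G.length := by rw [dfsA_len, hlen]
          have hbin' : BinV (dfsA G fuel i acc) := dfsA_bin G fuel i acc hbin
          have hO' : ∀ j : Nat, (dfsA G fuel i acc).getD j 1 = (V.set (nrm G.length n) 1).getD j 1 ∨
              (dfsA G fuel i acc).getD j 1 = 1 := by
            intro j
            rcases dfsA_O G fuel i acc j with h1 | h1
            · rw [h1]; exact hO j
            · right; exact h1
          have hstart' : (dfsA G fuel i acc).getD (nrm G.length n) 1 = 1 :=
            dfsA_mono G fuel i acc _ hstart
          have hclos' : ∀ u w : Nat, (dfsA G fuel i acc).getD u 1 = 1 → V.getD u 1 = 0 →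
              u ≠ nrm G.length n → w ∈ adjN G u → (dfsA G fuel i acc).getD w 1 = 1 := by
            intro u w hu hVu hun hw
            rcases hbin u with hau | hau
            · exact Aclos u w hu (Or.inr hau) hw
            · exact dfsA_mono G fuel i acc w (hclos u w hau hVu hun hw)
          obtain ⟨c1, c2, c3, c4, c5, c6⟩ :=
            ihl (dfsA G fuel i acc) (fun x hx => hns x (List.mem_cons_of_mem i hx))
              hlen' hbin' hO' hstart' hclos'
          refine ⟨c1, c2, ?_, c4, c5, ?_⟩
          · intro j
            rcases c3 j with h1 | h1
            · rcases dfsA_O G fuel i acc j with h2 | h2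
              · left; rw [h1, h2]
              · right; rw [h1, h2]
            · right; exact h1
          · intro x hx
            rcases List.mem_cons.mp hx with hx | hx
            · subst hx
              rcases c3 (nrm G.length x) with h1 | h1
              · rw [h1]; exact Astart
              · exact h1
            · exact c6 x hx
        · rw [if_neg hg]
          have hi1 : acc.getD (nrm G.length i) 1 = 1 := by
            rcases hbin (nrm G.length i) with h1 | h1
            · exfalso; apply hg; rw [hgetE, h1]; rfl
            · exact h1
          obtain ⟨c1, c2, c3, c4, c5, c6⟩ :=
            ihl acc (fun x hx => hns x (List.mem_cons_of_mem i hx)) hlen hbin hO hstart hclos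
          refine ⟨c1, c2, c3, c4, c5, ?_⟩
          intro x hx
          rcases List.mem_cons.mp hx with hx | hx
          · subst hx
            rcases c3 (nrm G.length x) with h1 | h1
            · rw [h1]; exact hi1
            · exact h1
          · exact c6 x hx
    -- apply key to the full row
    simp only [dfsA]
    rw [hsetE]
    obtain ⟨c1, c2, c3, c4, c5, c6⟩ := key (PySem.List.pyGetD G n []) (V.set (nrm G.length n) 1)
      (row_InRange hG hn) hV1len hV1bin (fun j => Or.inl rfl)
      (getD_set_self V _ 1 hlt)
      (by
        intro u w hu hVu hun hw
        rw [getD_set_ne V _ u 1 hun] at hu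
        rw [hu] at hVu; exact absurd hVu (by norm_num))
    refine ⟨c4, ?_⟩
    intro u w hu hcond hw
    by_cases hun : u = nrm G.length n
    · subst hun
      obtain ⟨x, hx, hwx⟩ := adjN_char hn hw
      rw [hwx]
      exact c6 x hx
    · rcases hcond with h | h
      · exact absurd h hun
      · exact c5 u w hu h hun hw
theorem dfsA_char (G : List (List Int)) (hG : GOK G) (fuel : Nat) (n : Int) (V : List Int)
    (hn : PySem.Raise.InRange G.length n) (hVN : V.length = G.length) (hBin : BinV V)
    (h0 : V.getD (nrm G.length n) 1 = 0) (hfuel : zerosV V ≤ fuel) :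
    ∀ j : Nat, (dfsA G fuel n V).getD j 1 = 1 ↔ (V.getD j 1 = 1 ∨ ReachU G V (nrm G.length n) j) := by
  intro j
  obtain ⟨hstart, hclos⟩ := dfsA_C G hG fuel n V hn hVN hBin h0 hfuel
  constructor
  · exact dfsA_S G hG fuel n V hn hVN j
  · rintro (h | h)
    · exact dfsA_mono G fuel n V j h
    · induction h with
      | refl => exact hstart
      | step u w hr hw hz ihr =>
        have hu1 := ihr
        rcases ReachU_inv hr with h1 | h1
        · exact hclos u w hu1 (Or.inl h1) hw
        · exact hclos u w hu1 (Or.inr h1) hw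

theorem push_fold_eq (ns : List Int) (rest : List Int) (V1 : List Int) :
    ns.foldl (fun st w => if PySem.List.pyGetD V1 w 1 == 0 then st ++ [w] else st) rest =
      rest ++ ns.filter (fun w => PySem.List.pyGetD V1 w 1 == 0) :=
  PySem.List.foldl_append_if_eq_filter _ _ _

theorem floodLoop_len (G : List (List Int)) :
    ∀ fuel (stack V : List Int), (floodLoop G fuel stack V).length = V.length := by
  intro fuel
  induction fuel with
  | zero => intro stack V; simp [floodLoop]
  | succ fuel ih =>
    intro stack V
    rcases hL : stack.getLast? with _ | u
    · simp [floodLoop, hL]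
    · obtain ⟨l', rfl⟩ := List.getLast?_eq_some_iff.mp hL
      simp only [floodLoop, List.getLast?_concat, List.dropLast_concat]
      by_cases hg : PySem.List.pyGetD V u 1 == 0
      · rw [if_pos hg, ih, PySem.List.length_pySetD]
      · rw [if_neg hg, ih]

theorem floodLoop_O (G : List (List Int)) :
    ∀ fuel (stack V : List Int) (j : Nat),
      (floodLoop G fuel stack V).getD j 1 = V.getD j 1 ∨ (floodLoop G fuel stack V).getD j 1 = 1 := by
  intro fuel
  induction fuel with
  | zero => intro stack V j; simp [floodLoop]
  | succ fuel ih =>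
    intro stack V j
    rcases hL : stack.getLast? with _ | u
    · simp [floodLoop, hL]
    · obtain ⟨l', rfl⟩ := List.getLast?_eq_some_iff.mp hL
      simp only [floodLoop, List.getLast?_concat, List.dropLast_concat]
      by_cases hg : PySem.List.pyGetD V u 1 == 0
      · rw [if_pos hg]
        rcases ih _ (PySem.List.pySetD V u 1) j with h1 | h1
        · rw [h1]
          simp only [PySem.List.pySetD, PySem.List.pySet?]
          cases h : PySem.List.pyIdx? V.length u with
          | none => simp
          | some k => simpa using getD_set_cases V k j
        · right; exact h1
      · rw [if_neg hg]; exact ih _ V j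

theorem floodLoop_mono (G : List (List Int)) (fuel : Nat) (stack V : List Int) (j : Nat)
    (h : V.getD j 1 = 1) : (floodLoop G fuel stack V).getD j 1 = 1 := by
  rcases floodLoop_O G fuel stack V j with h1 | h1
  · rw [h1, h]
  · exact h1

theorem floodLoop_bin (G : List (List Int)) (fuel : Nat) (stack V : List Int)
    (h : BinV V) : BinV (floodLoop G fuel stack V) := by
  intro j
  rcases floodLoop_O G fuel stack V j with h1 | h1
  · rw [h1]; exact h j
  · right; exact h1
theorem row_len_le {G : List (List Int)} {u : Int} (hu : PySem.Raise.InRange G.length u) :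
    (PySem.List.pyGetD G u []).length ≤ (G.map List.length).sum :=
  List.le_sum_of_mem (List.mem_map_of_mem (row_mem hu))

theorem floodLoop_M (G : List (List Int)) (hG : GOK G) :
    ∀ fuel (stack V : List Int), (∀ x ∈ stack, PySem.Raise.InRange G.length x) →
      V.length = G.length → BinV V →
      stack.length + zerosV V * (1 + (G.map List.length).sum) ≤ fuel →
      ∀ s ∈ stack, (floodLoop G fuel stack V).getD (nrm G.length s) 1 = 1 := by
  intro fuel
  induction fuel with
  | zero =>
    intro stack V _ _ _ hfuel s hs
    exact absurd (List.length_pos_of_mem hs) (by omega)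
  | succ fuel ih =>
    intro stack V hstk hVN hBin hfuel s hs
    rcases hL : stack.getLast? with _ | u
    · rw [List.getLast?_eq_none_iff] at hL
      subst hL; simp at hs
    · obtain ⟨l', rfl⟩ := List.getLast?_eq_some_iff.mp hL
      have hu : PySem.Raise.InRange G.length u := hstk u (by simp)
      have hgetE : PySem.List.pyGetD V u 1 = V.getD (nrm G.length u) 1 := by
        rw [pyGetD_nrm V 1 (hVN ▸ hu), hVN]
      simp only [floodLoop, List.getLast?_concat, List.dropLast_concat]
      by_cases hg : PySem.List.pyGetD V u 1 == 0
      · rw [if_pos hg, push_fold_eq]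
        have hV0 : V.getD (nrm G.length u) 1 = 0 := by rw [← hgetE]; simpa using hg
        have hsetE : PySem.List.pySetD V u 1 = V.set (nrm G.length u) 1 := by
          rw [pySetD_nrm V 1 (hVN ▸ hu), hVN]
        have hklt : nrm G.length u < V.length := lt_len_of_getD_zero hV0
        have hz1 : zerosV (V.set (nrm G.length u) 1) + 1 ≤ zerosV V := zerosV_set_lt hV0
        have hfuel' : (l' ++ (PySem.List.pyGetD G u []).filter
              (fun w => PySem.List.pyGetD (PySem.List.pySetD V u 1) w 1 == 0)).length +
            zerosV (PySem.List.pySetD V u 1) * (1 + (G.map List.length).sum) ≤ fuel := by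
          have hflen : ((PySem.List.pyGetD G u []).filter
              (fun w => PySem.List.pyGetD (PySem.List.pySetD V u 1) w 1 == 0)).length ≤
              (G.map List.length).sum :=
            le_trans (List.length_filter_le _ _) (row_len_le hu)
          have hz1' : zerosV (PySem.List.pySetD V u 1) + 1 ≤ zerosV V := by
            rw [hsetE]; exact hz1
          have hmul : (zerosV (PySem.List.pySetD V u 1) + 1) * (1 + (G.map List.length).sum) ≤
              zerosV V * (1 + (G.map List.length).sum) := Nat.mul_le_mul_right _ hz1'
          rw [Nat.add_mul, Nat.one_mul] at hmul
          simp only [List.length_append, List.length_singleton] at hfuel ⊢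
          omega
        have hstk' : ∀ x ∈ l' ++ (PySem.List.pyGetD G u []).filter
            (fun w => PySem.List.pyGetD (PySem.List.pySetD V u 1) w 1 == 0),
            PySem.Raise.InRange G.length x := by
          intro x hx
          rcases List.mem_append.mp hx with hx | hx
          · exact hstk x (List.mem_append_left _ hx)
          · exact row_InRange hG hu x (List.mem_of_mem_filter hx)
        have hlen1 : (PySem.List.pySetD V u 1).length = G.length := by
          rw [PySem.List.length_pySetD, hVN]
        have hbin1 : BinV (PySem.List.pySetD V u 1) := by
          rw [hsetE]
          intro j
          rcases getD_set_cases V (nrm G.length u) j with h | h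
          · rw [h]; exact hBin j
          · right; exact h
        rcases List.mem_append.mp hs with hsl | hsu
        · exact ih _ _ hstk' hlen1 hbin1 hfuel' s (List.mem_append_left _ hsl)
        · have hsu : s = u := by simpa using hsu
          subst hsu
          apply floodLoop_mono
          rw [hsetE]
          exact getD_set_self V _ 1 hklt
      · rw [if_neg hg]
        have hV1 : V.getD (nrm G.length u) 1 = 1 := by
          rcases hBin (nrm G.length u) with h1 | h1
          · exfalso; apply hg; rw [hgetE, h1]; rfl
          · exact h1
        have hfuel' : l'.length + zerosV V * (1 + (G.map List.length).sum) ≤ fuel := by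
          simp only [List.length_append, List.length_singleton] at hfuel; omega
        rcases List.mem_append.mp hs with hsl | hsu
        · exact ih _ _ (fun x hx => hstk x (List.mem_append_left _ hx)) hVN hBin hfuel' s hsl
        · have hsu : s = u := by simpa using hsu
          subst hsu
          exact floodLoop_mono G fuel l' V _ hV1
theorem getD_set_zero {V : List Int} {k j : Nat} (h : (V.set k 1).getD j 1 = 0) :
    V.getD j 1 = 0 := by
  rcases getD_set_cases V k j with h1 | h1
  · rw [← h1]; exact h
  · rw [h1] at h; omega

theorem floodLoop_S (G : List (List Int)) (hG : GOK G) :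
    ∀ fuel (stack V : List Int), (∀ x ∈ stack, PySem.Raise.InRange G.length x) →
      V.length = G.length →
      ∀ j : Nat, (floodLoop G fuel stack V).getD j 1 = 1 →
        V.getD j 1 = 1 ∨ ∃ s : Int, s ∈ stack ∧ V.getD (nrm G.length s) 1 = 0 ∧
          ReachU G V (nrm G.length s) j := by
  intro fuel
  induction fuel with
  | zero => intro stack V _ _ j h; left; simpa [floodLoop] using h
  | succ fuel ih =>
    intro stack V hstk hVN j
    rcases hL : stack.getLast? with _ | u
    · rw [List.getLast?_eq_none_iff] at hL
      subst hL
      intro h; left; simpa [floodLoop] using h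
    · obtain ⟨l', rfl⟩ := List.getLast?_eq_some_iff.mp hL
      have hu : PySem.Raise.InRange G.length u := hstk u (by simp)
      have hgetE : PySem.List.pyGetD V u 1 = V.getD (nrm G.length u) 1 := by
        rw [pyGetD_nrm V 1 (hVN ▸ hu), hVN]
      simp only [floodLoop, List.getLast?_concat, List.dropLast_concat]
      by_cases hg : PySem.List.pyGetD V u 1 == 0
      · rw [if_pos hg, push_fold_eq]
        have hV0 : V.getD (nrm G.length u) 1 = 0 := by rw [← hgetE]; simpa using hg
        have hsetE : PySem.List.pySetD V u 1 = V.set (nrm G.length u) 1 := by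
          rw [pySetD_nrm V 1 (hVN ▸ hu), hVN]
        have hklt : nrm G.length u < V.length := lt_len_of_getD_zero hV0
        have hlen1 : (PySem.List.pySetD V u 1).length = G.length := by
          rw [PySem.List.length_pySetD, hVN]
        have h0trans : ∀ w : Nat, (PySem.List.pySetD V u 1).getD w 1 = 0 → V.getD w 1 = 0 := by
          intro w hw
          rw [hsetE] at hw
          exact getD_set_zero hw
        have hstk' : ∀ x ∈ l' ++ (PySem.List.pyGetD G u []).filter
            (fun w => PySem.List.pyGetD (PySem.List.pySetD V u 1) w 1 == 0),
            PySem.Raise.InRange G.length x := by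
          intro x hx
          rcases List.mem_append.mp hx with hx | hx
          · exact hstk x (List.mem_append_left _ hx)
          · exact row_InRange hG hu x (List.mem_of_mem_filter hx)
        intro hj
        rcases ih _ _ hstk' hlen1 j hj with h1 | ⟨s, hsmem, hs0, hsr⟩
        · rw [hsetE] at h1
          by_cases hjn : j = nrm G.length u
          · right
            refine ⟨u, by simp, hV0, ?_⟩
            rw [hjn]; exact ReachU.refl
          · left; rwa [getD_set_ne V _ j 1 hjn] at h1
        · rcases List.mem_append.mp hsmem with hsl | hsf
          · right
            exact ⟨s, List.mem_append_left _ hsl, h0trans _ hs0,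
              ReachU_mono h0trans ReachU.refl hsr⟩
          · right
            refine ⟨u, by simp, hV0, ?_⟩
            have hsns : s ∈ PySem.List.pyGetD G u [] := List.mem_of_mem_filter hsf
            have hbase : ReachU G V (nrm G.length u) (nrm G.length s) :=
              ReachU.step _ _ ReachU.refl (mem_adjN_of hu hsns) (h0trans _ hs0)
            exact ReachU_mono h0trans hbase hsr
      · rw [if_neg hg]
        intro hj
        rcases ih _ _ (fun x hx => hstk x (List.mem_append_left _ hx)) hVN j hj with h1 | ⟨s, hsmem, hs0, hsr⟩
        · left; exact h1
        · right; exact ⟨s, List.mem_append_left _ hsmem, hs0, hsr⟩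

theorem floodLoop_C (G : List (List Int)) (hG : GOK G) :
    ∀ fuel (stack V : List Int), (∀ x ∈ stack, PySem.Raise.InRange G.length x) →
      V.length = G.length → BinV V →
      stack.length + zerosV V * (1 + (G.map List.length).sum) ≤ fuel →
      ∀ u w : Nat, (floodLoop G fuel stack V).getD u 1 = 1 → V.getD u 1 = 0 →
        w ∈ adjN G u → (floodLoop G fuel stack V).getD w 1 = 1 := by
  intro fuel
  induction fuel with
  | zero =>
    intro stack V _ _ _ _ u w hu hVu _
    simp only [floodLoop] at hu
    rw [hu] at hVu; exact absurd hVu (by norm_num)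
  | succ fuel ih =>
    intro stack V hstk hVN hBin hfuel u w hu hVu hw
    rcases hL : stack.getLast? with _ | x
    · rw [List.getLast?_eq_none_iff] at hL
      subst hL
      simp only [floodLoop, List.getLast?_nil] at hu ⊢
      rw [hu] at hVu; exact absurd hVu (by norm_num)
    · obtain ⟨l', rfl⟩ := List.getLast?_eq_some_iff.mp hL
      have hx : PySem.Raise.InRange G.length x := hstk x (by simp)
      have hgetE : PySem.List.pyGetD V x 1 = V.getD (nrm G.length x) 1 := by
        rw [pyGetD_nrm V 1 (hVN ▸ hx), hVN]
      simp only [floodLoop, List.getLast?_concat, List.dropLast_concat] at hu ⊢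
      by_cases hg : PySem.List.pyGetD V x 1 == 0
      · rw [if_pos hg, push_fold_eq] at hu ⊢
        have hV0 : V.getD (nrm G.length x) 1 = 0 := by rw [← hgetE]; simpa using hg
        have hsetE : PySem.List.pySetD V x 1 = V.set (nrm G.length x) 1 := by
          rw [pySetD_nrm V 1 (hVN ▸ hx), hVN]
        have hklt : nrm G.length x < V.length := lt_len_of_getD_zero hV0
        have hz1 : zerosV (V.set (nrm G.length x) 1) + 1 ≤ zerosV V := zerosV_set_lt hV0
        have hlen1 : (PySem.List.pySetD V x 1).length = G.length := by
          rw [PySem.List.length_pySetD, hVN]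
        have hbin1 : BinV (PySem.List.pySetD V x 1) := by
          rw [hsetE]
          intro j
          rcases getD_set_cases V (nrm G.length x) j with h | h
          · rw [h]; exact hBin j
          · right; exact h
        have hstk' : ∀ y ∈ l' ++ (PySem.List.pyGetD G x []).filter
            (fun w => PySem.List.pyGetD (PySem.List.pySetD V x 1) w 1 == 0),
            PySem.Raise.InRange G.length y := by
          intro y hy
          rcases List.mem_append.mp hy with hy | hy
          · exact hstk y (List.mem_append_left _ hy)
          · exact row_InRange hG hx y (List.mem_of_mem_filter hy)
        have hfuel' : (l' ++ (PySem.List.pyGetD G x []).filter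
              (fun w => PySem.List.pyGetD (PySem.List.pySetD V x 1) w 1 == 0)).length +
            zerosV (PySem.List.pySetD V x 1) * (1 + (G.map List.length).sum) ≤ fuel := by
          have hflen : ((PySem.List.pyGetD G x []).filter
              (fun w => PySem.List.pyGetD (PySem.List.pySetD V x 1) w 1 == 0)).length ≤
              (G.map List.length).sum :=
            le_trans (List.length_filter_le _ _) (row_len_le hx)
          have hz1' : zerosV (PySem.List.pySetD V x 1) + 1 ≤ zerosV V := by
            rw [hsetE]; exact hz1
          have hmul : (zerosV (PySem.List.pySetD V x 1) + 1) * (1 + (G.map List.length).sum) ≤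
              zerosV V * (1 + (G.map List.length).sum) := Nat.mul_le_mul_right _ hz1'
          rw [Nat.add_mul, Nat.one_mul] at hmul
          simp only [List.length_append, List.length_singleton] at hfuel ⊢
          omega
        by_cases hux : u = nrm G.length x
        · obtain ⟨y, hy, hwy⟩ := adjN_char hx (hux ▸ hw)
          have hyR : PySem.Raise.InRange G.length y := row_InRange hG hx y hy
          have hyE : PySem.List.pyGetD (PySem.List.pySetD V x 1) y 1 =
              (PySem.List.pySetD V x 1).getD (nrm G.length y) 1 := by
            rw [pyGetD_nrm _ 1 (hlen1 ▸ hyR), hlen1]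
          by_cases hyg : PySem.List.pyGetD (PySem.List.pySetD V x 1) y 1 == 0
          · have hymem : y ∈ l' ++ (PySem.List.pyGetD G x []).filter
                (fun w => PySem.List.pyGetD (PySem.List.pySetD V x 1) w 1 == 0) :=
              List.mem_append_right _ (List.mem_filter.mpr ⟨hy, hyg⟩)
            have := floodLoop_M G hG fuel _ _ hstk' hlen1 hbin1 hfuel' y hymem
            rw [hwy]; exact this
          · have hy1 : (PySem.List.pySetD V x 1).getD (nrm G.length y) 1 = 1 := by
              rcases hbin1 (nrm G.length y) with h1 | h1
              · exfalso; apply hyg; rw [hyE, h1]; rfl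
              · exact h1
            rw [hwy]
            exact floodLoop_mono G fuel _ _ _ hy1
        · have hV1u : (PySem.List.pySetD V x 1).getD u 1 = 0 := by
            rw [hsetE, getD_set_ne V _ u 1 hux]; exact hVu
          exact ih _ _ hstk' hlen1 hbin1 hfuel' u w hu hV1u hw
      · rw [if_neg hg] at hu ⊢
        have hfuel' : l'.length + zerosV V * (1 + (G.map List.length).sum) ≤ fuel := by
          simp only [List.length_append, List.length_singleton] at hfuel; omega
        exact ih _ _ (fun y hy => hstk y (List.mem_append_left _ hy)) hVN hBin hfuel' u w hu hVu hw
theorem floodB_char (G : List (List Int)) (hG : GOK G) (start : Int) (V : List Int)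
    (hs : PySem.Raise.InRange G.length start) (hVN : V.length = G.length) (hBin : BinV V)
    (h0 : V.getD (nrm G.length start) 1 = 0) :
    ∀ j : Nat, (floodB G start V).getD j 1 = 1 ↔
      (V.getD j 1 = 1 ∨ ReachU G V (nrm G.length start) j) := by
  have hstk : ∀ x ∈ [start], PySem.Raise.InRange G.length x := by
    intro x hx; rw [List.mem_singleton] at hx; subst hx; exact hs
  have hfuel : [start].length + zerosV V * (1 + (G.map List.length).sum) ≤
      1 + G.length * (1 + (G.map List.length).sum) := by
    have hz : zerosV V ≤ G.length := hVN ▸ zerosV_le_length V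
    have := Nat.mul_le_mul_right (1 + (G.map List.length).sum) hz
    simpa using by omega
  intro j
  constructor
  · intro hj
    rcases floodLoop_S G hG _ [start] V hstk hVN j hj with h1 | ⟨s, hsmem, hs0, hsr⟩
    · left; exact h1
    · rw [List.mem_singleton] at hsmem
      subst hsmem
      right; exact hsr
  · rintro (h | h)
    · exact floodLoop_mono G _ [start] V j h
    · induction h with
      | refl =>
        exact floodLoop_M G hG _ [start] V hstk hVN hBin hfuel start (List.mem_singleton.mpr rfl)
      | step u w hr hwmem hz ihr =>
        have hVu : V.getD u 1 = 0 := by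
          rcases ReachU_inv hr with h1 | h1
          · rw [h1]; exact h0
          · exact h1
        exact floodLoop_C G hG _ [start] V hstk hVN hBin hfuel u w ihr hVu hwmem

theorem dfs_eq_flood (G : List (List Int)) (hG : GOK G) (n : Int) (V : List Int)
    (hn : PySem.Raise.InRange G.length n) (hVN : V.length = G.length) (hBin : BinV V)
    (h0 : V.getD (nrm G.length n) 1 = 0) :
    dfsA G (G.length + 1) n V = floodB G n V := by
  have hfA : zerosV V ≤ G.length + 1 := by
    have := zerosV_le_length V; omega
  have charA := dfsA_char G hG (G.length + 1) n V hn hVN hBin h0 hfA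
  have charB := floodB_char G hG n V hn hVN hBin h0
  have hlenA : (dfsA G (G.length + 1) n V).length = V.length := dfsA_len G _ n V
  have hlenB : (floodB G n V).length = V.length := floodLoop_len G _ [n] V
  apply List.ext_getElem (by rw [hlenA, hlenB])
  intro i h1 h2
  rw [← List.getD_eq_getElem _ 1 h1, ← List.getD_eq_getElem _ 1 h2]
  by_cases hc : V.getD i 1 = 1 ∨ ReachU G V (nrm G.length n) i
  · rw [(charA i).mpr hc, (charB i).mpr hc]
  · have hA : (dfsA G (G.length + 1) n V).getD i 1 = V.getD i 1 := by
      rcases dfsA_O G (G.length + 1) n V i with h | h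
      · exact h
      · exact absurd ((charA i).mp h) hc
    have hB : (floodB G n V).getD i 1 = V.getD i 1 := by
      rcases floodLoop_O G _ [n] V i with h | h
      · exact h
      · exact absurd ((charB i).mp h) hc
    rw [hA, hB]

theorem phase_eq (G : List (List Int)) (hG : GOK G) :
    ∀ (l : List Int), (∀ x ∈ l, PySem.Raise.InRange G.length x) →
      ∀ (V : List Int) (last : Option Int), V.length = G.length → BinV V →
      (l.foldl (fun (s : List Int × Option Int) i =>
          if PySem.List.pyGetD s.1 i 1 == 0 then (dfsA G (G.length + 1) i s.1, some i) else s) (V, last) =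
        l.foldl (fun (s : List Int × Option Int) i =>
          if PySem.List.pyGetD s.1 i 1 == 0 then (floodB G i s.1, some i) else s) (V, last)) ∧
      ((l.foldl (fun (s : List Int × Option Int) i =>
          if PySem.List.pyGetD s.1 i 1 == 0 then (dfsA G (G.length + 1) i s.1, some i) else s) (V, last)).2 = last ∨
        ∃ i ∈ l, (l.foldl (fun (s : List Int × Option Int) i =>
          if PySem.List.pyGetD s.1 i 1 == 0 then (dfsA G (G.length + 1) i s.1, some i) else s) (V, last)).2 = some i) := by
  intro l
  induction l with
  | nil => intro _ V last _ _; exact ⟨rfl, Or.inl rfl⟩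
  | cons i l ihl =>
    intro hmem V last hVN hBin
    have hiR : PySem.Raise.InRange G.length i := hmem i List.mem_cons_self
    simp only [List.foldl_cons]
    by_cases hg : PySem.List.pyGetD V i 1 == 0
    · rw [if_pos hg, if_pos hg]
      have h0 : V.getD (nrm G.length i) 1 = 0 := by
        have := pyGetD_nrm V 1 (hVN ▸ hiR)
        rw [this, hVN] at hg
        simpa using hg
      have hEq : dfsA G (G.length + 1) i V = floodB G i V :=
        dfs_eq_flood G hG i V hiR hVN hBin h0
      have hlen' : (floodB G i V).length = G.length := by
        rw [floodB]; rw [floodLoop_len, hVN]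
      have hbin' : BinV (floodB G i V) := by rw [floodB]; exact floodLoop_bin G _ [i] V hBin
      obtain ⟨e1, e2⟩ := ihl (fun x hx => hmem x (List.mem_cons_of_mem i hx))
        (floodB G i V) (some i) hlen' hbin'
      rw [hEq]
      refine ⟨e1, ?_⟩
      rcases e2 with e2 | ⟨x, hx, e2⟩
      · right; exact ⟨i, List.mem_cons_self, e2⟩
      · right; exact ⟨x, List.mem_cons_of_mem i hx, e2⟩
    · rw [if_neg hg, if_neg hg]
      obtain ⟨e1, e2⟩ := ihl (fun x hx => hmem x (List.mem_cons_of_mem i hx)) V last hVN hBin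
      refine ⟨e1, ?_⟩
      rcases e2 with e2 | ⟨x, hx, e2⟩
      · left; exact e2
      · right; exact ⟨x, List.mem_cons_of_mem i hx, e2⟩

-- ===== VERDICT =====
theorem containPrincipalNode_spec : Claim_equal_containPrincipalNode := by
  intro G _ hPre
  obtain ⟨hne, hGOK⟩ := hPre
  have hG : GOK G := hGOK
  unfold Spec_containPrincipalNode
  simp only [containPrincipalNode, containPrincipalNode_alt]
  have hmem : ∀ x ∈ PySem.List.pyRange 0 (G.length : Int) 1, PySem.Raise.InRange G.length x := by
    intro x hx
    rw [PySem.List.mem_pyRange_one] at hx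
    exact ⟨by omega, hx.2⟩
  have hlen0 : (List.replicate G.length (0:Int)).length = G.length := by simp
  have hbin0 : BinV (List.replicate G.length (0:Int)) := by
    intro j
    rw [getD_replicate]
    split
    · left; rfl
    · right; rfl
  obtain ⟨hfold, hsnd⟩ := phase_eq G hG _ hmem (List.replicate G.length 0) none hlen0 hbin0
  rw [← hfold]
  rcases hsnd with h | ⟨i, hi, h⟩
  · rw [h]
  · rw [h]
    have hiR : PySem.Raise.InRange G.length i := hmem i hi
    have h0 : (List.replicate G.length (0:Int)).getD (nrm G.length i) 1 = 0 := by
      rw [getD_replicate]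
      · rw [if_pos (nrm_lt hiR)]
    have hEq : dfsA G (G.length + 1) i (List.replicate G.length 0) =
        floodB G i (List.replicate G.length 0) :=
      dfs_eq_flood G hG i _ hiR hlen0 hbin0 h0
    simp only [pricipalNode, hEq]
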